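-- pv_equiv track=rewrite | github.com/efemayoglu/Algorithm-Solving | beetween-two-sets/main.py | calculateForArr
-- ===== SOURCE A (Python) =====
-- def calculateForArr(arr1, arr2):
--     myset = {-8}
--     for i in arr1:
--         if calculateIntoTheArray(i,arr1):
--             for j in arr2:
--                 isFalse = False
--                 if calculateBy2param(j,i) == True:
--                     pass
--                 else:
--                     isFalse = True
--             if  isFalse == False:
--                 myset.add(i)
--     return myset
--
-- def calculateBy2param(param1, param2):
--     return True if param1 % param2 == 0 else False
--
-- def calculateIntoTheArray(elem, arr):
--     for i in arr:
--         if i%elem != 0: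
--             return False
--     return True
-- ===== SOURCE B (Python) =====
-- # B: gcd-based rewrite. Precomputing gcd(arr1) and gcd(arr2) removes both inner scans:
-- # i qualifies iff i divides gcd(arr1) and i divides gcd(arr2). Keeps A's {-8} seed
-- # (A's returned set always contains -8). Intended fix: A only tests the LAST element
-- # of arr2 (its isFalse flag is overwritten each inner iteration); B tests all of arr2.
-- def _gcd(a, b):
--     a, b = abs(a), abs(b)
--     while b:
--         a, b = b, a % b
--     return a
--
-- def calculateForArr(arr1, arr2):
--     g1 = 0
--     for x in arr1:
--         g1 = _gcd(g1, x)
--     g2 = 0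
--     for y in arr2:
--         g2 = _gcd(g2, y)
--     res = {-8}
--     for i in arr1:
--         if g1 % i == 0 and g2 % i == 0:
--             res.add(i)
--     return res
-- ===== Notes on version B (the rewrite author's own statement) =====
-- stated objective: faster
-- what changed: B precomputes gcd(arr1) and gcd(arr2) once and tests each i by two divisibility checks, removing A's O(n1) inner scan per element (and A's per-element arr2 loop); as the intended fix stated in differs, B tests all of arr2 where A's overwritten flag only tests its last element.
-- intended difference: On inputs where some i in arr1 (other than A's -8 seed) divides all of arr1 and the last element of arr2 but not every element of arr2, A includes i in the returned set (its isFalse flag is overwritten each inner iteration, so only arr2's last element is tested) while B excludes i, which is the intended 'between two sets' behaviour. — e.g. on calculateForArr([2], [3, 2]): A returns [-8, 2], B returns [-8]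
import Mathlib
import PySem

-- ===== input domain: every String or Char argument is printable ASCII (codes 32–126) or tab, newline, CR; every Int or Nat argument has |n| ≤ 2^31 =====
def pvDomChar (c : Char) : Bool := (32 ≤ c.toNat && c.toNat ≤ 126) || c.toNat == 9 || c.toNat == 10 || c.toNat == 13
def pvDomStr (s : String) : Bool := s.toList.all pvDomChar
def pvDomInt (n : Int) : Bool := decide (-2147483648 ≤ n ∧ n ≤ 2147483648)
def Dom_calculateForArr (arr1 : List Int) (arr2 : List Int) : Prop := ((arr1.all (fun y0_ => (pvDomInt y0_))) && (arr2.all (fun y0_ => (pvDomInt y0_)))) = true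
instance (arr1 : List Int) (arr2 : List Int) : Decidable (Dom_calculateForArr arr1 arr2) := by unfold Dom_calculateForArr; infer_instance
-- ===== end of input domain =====

-- B replaces A's two inner scans by precomputed gcds (and, as an intended fix stated in D_ below,
-- tests ALL of arr2 where A's overwritten flag only tests its last element).

-- ===== PORT A =====
def calculateBy2param (param1 : Int) (param2 : Int) : Bool :=
  if PySem.Int.mod param1 param2 == 0 then true else false

def calculateIntoTheArray (elem : Int) (arr : List Int) : Bool :=
  match arr with
  | [] => true
  | i :: rest => if PySem.Int.mod i elem ≠ 0 then false else calculateIntoTheArray elem rest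

-- one outer-loop iteration of A; st.1 is the (possibly still unbound = none) isFalse flag
def calcAStep (arr1 : List Int) (arr2 : List Int) (st : Option Bool × PySem.Set Int) (i : Int) :
    Option Bool × PySem.Set Int :=
  if calculateIntoTheArray i arr1 then
    let isF := arr2.foldl (fun _ j => some (if calculateBy2param j i == true then false else true)) st.1
    (isF, if isF == some false then PySem.Set.add st.2 i else st.2)
  else st

def calculateForArr (arr1 : List Int) (arr2 : List Int) : List Int :=
  (arr1.foldl (calcAStep arr1 arr2) ((none : Option Bool), PySem.Set.ofList [(-8 : Int)])).2

-- ===== PORT B =====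
-- Source B's hand-written Euclid loop (on absolute values, where Python's % agrees with Nat.mod)
-- fuel only makes the loop's structural recursion total; b strictly decreases, so b+1 steps suffice
def gcdLoopFuel : Nat → Nat → Nat → Nat
  | 0, a, _ => a
  | _ + 1, a, 0 => a
  | f + 1, a, Nat.succ b => gcdLoopFuel f (Nat.succ b) (a % Nat.succ b)

def gcdLoop (a b : Nat) : Nat := gcdLoopFuel (b + 1) a b

def pyGcd (a : Int) (b : Int) : Int := ((gcdLoop a.natAbs b.natAbs : Nat) : Int)

def calcBStep (g1 : Int) (g2 : Int) (res : PySem.Set Int) (i : Int) : PySem.Set Int :=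
  if PySem.Int.mod g1 i == 0 && PySem.Int.mod g2 i == 0 then PySem.Set.add res i else res

def calculateForArr_alt (arr1 : List Int) (arr2 : List Int) : List Int :=
  let g1 := arr1.foldl pyGcd 0
  let g2 := arr2.foldl pyGcd 0
  arr1.foldl (calcBStep g1 g2) (PySem.Set.ofList [(-8 : Int)])

-- ===== PRECONDITION & SPEC =====
-- Pre_ excludes exactly the inputs where A raises: 0 ∈ arr1 (ZeroDivisionError in
-- calculateIntoTheArray), and arr2 = [] while some i ∈ arr1 divides all of arr1
-- (isFalse is then referenced unbound: NameError).
def Pre_calculateForArr (arr1 : List Int) (arr2 : List Int) : Prop :=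
  (0 : Int) ∉ arr1 ∧ (arr2 = [] → ∀ i ∈ arr1, ∃ a ∈ arr1, ¬ i ∣ a)
instance (arr1 : List Int) (arr2 : List Int) : Decidable (Pre_calculateForArr arr1 arr2) := by
  unfold Pre_calculateForArr; infer_instance
def pvWitness_calculateForArr : List Int × List Int := ([1], [2])

-- On inputs where some i ∈ arr1 (other than A's -8 sentinel) divides all of arr1 and the LAST
-- element of arr2 but not every element of arr2, A wrongly includes i (its isFalse flag is
-- overwritten each inner iteration, so only arr2's last element is tested), while B excludes i,
-- which is the intended 'between two sets' behaviour.
def D_calculateForArr (arr1 : List Int) (arr2 : List Int) : Prop :=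
  arr2 ≠ [] ∧ ∃ i ∈ arr1, i ≠ -8 ∧ (∀ a ∈ arr1, i ∣ a) ∧ i ∣ arr2.getLastD 0 ∧ ∃ j ∈ arr2, ¬ i ∣ j
instance (arr1 : List Int) (arr2 : List Int) : Decidable (D_calculateForArr arr1 arr2) := by
  unfold D_calculateForArr; infer_instance

def Spec_calculateForArr (arr1 : List Int) (arr2 : List Int) (out : List Int) : Prop :=
  ¬ D_calculateForArr arr1 arr2 → out = calculateForArr_alt arr1 arr2
instance (arr1 : List Int) (arr2 : List Int) (out : List Int) : Decidable (Spec_calculateForArr arr1 arr2 out) := by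
  unfold Spec_calculateForArr; infer_instance

def pvDiffWitness_calculateForArr : List Int × List Int := ([2], [3, 2])
def pvDiffWitnessOut_calculateForArr : (List Int) × (List Int) := ([-8, 2], [-8])

-- ===== CLAIM (what is proved, stated in full; the proofs are below) =====
def Claim_unchanged_calculateForArr : Prop := ∀ (arr1 : List Int) (arr2 : List Int), Dom_calculateForArr arr1 arr2 → Pre_calculateForArr arr1 arr2 → Spec_calculateForArr arr1 arr2 (calculateForArr arr1 arr2)
def Claim_changed_calculateForArr : Prop := Dom_calculateForArr (pvDiffWitness_calculateForArr.1) (pvDiffWitness_calculateForArr.2) ∧ Pre_calculateForArr (pvDiffWitness_calculateForArr.1) (pvDiffWitness_calculateForArr.2) ∧ D_calculateForArr (pvDiffWitness_calculateForArr.1) (pvDiffWitness_calculateForArr.2) ∧ calculateForArr (pvDiffWitness_calculateForArr.1) (pvDiffWitness_calculateForArr.2) = pvDiffWitnessOut_calculateForArr.1 ∧ calculateForArr_alt (pvDiffWitness_calculateForArr.1) (pvDiffWitness_calculateForArr.2) = pvDiffWitnessOut_calculateForArr.2 ∧ pvDiffWitnessOut_calculateForArr.1 ≠ pvDiffWitn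essOut_calculateForArr.2
def Claim_exact_calculateForArr : Prop := ∀ (arr1 : List Int) (arr2 : List Int), Dom_calculateForArr arr1 arr2 → Pre_calculateForArr arr1 arr2 → D_calculateForArr arr1 arr2 → calculateForArr arr1 arr2 ≠ calculateForArr_alt arr1 arr2

-- ===== LEMMAS AND PROOFS =====

theorem calcInto_iff (elem : Int) (arr : List Int) :
    calculateIntoTheArray elem arr = true ↔ ∀ a ∈ arr, elem ∣ a := by
  induction arr with
  | nil => simp [calculateIntoTheArray]
  | cons a rest ih =>
    rw [calculateIntoTheArray]
    by_cases h : PySem.Int.mod a elem = 0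
    · have h' : elem ∣ a := (PySem.Int.mod_eq_zero_iff_dvd a elem).mp h
      simp [h, ih, h']
    · have h' : ¬ elem ∣ a := fun hc => h ((PySem.Int.mod_eq_zero_iff_dvd a elem).mpr hc)
      rw [if_pos h]
      simp only [Bool.false_eq_true, false_iff]
      exact fun hall => h' (hall a (by simp))

theorem gcdLoopFuel_eq (f : Nat) : ∀ (a b : Nat), b < f → gcdLoopFuel f a b = Nat.gcd a b := by
  induction f with
  | zero => intro a b h; exact absurd h (Nat.not_lt_zero b)
  | succ f ih =>
    intro a b h
    cases b with
    | zero => simp [gcdLoopFuel]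
    | succ b =>
      rw [gcdLoopFuel, ih _ _ (Nat.lt_of_lt_of_le (Nat.mod_lt _ (Nat.succ_pos _)) (Nat.le_of_lt_succ h)),
          Nat.gcd_comm, ← Nat.gcd_rec, Nat.gcd_comm]

theorem gcdLoop_eq (a b : Nat) : gcdLoop a b = Nat.gcd a b :=
  gcdLoopFuel_eq (b + 1) a b (Nat.lt_succ_self b)

theorem dvd_pyGcd_iff (i a b : Int) : i ∣ pyGcd a b ↔ i ∣ a ∧ i ∣ b := by
  unfold pyGcd
  rw [gcdLoop_eq]
  show i ∣ ((Int.gcd a b : Nat) : Int) ↔ _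
  constructor
  · intro h
    exact ⟨h.trans (Int.gcd_dvd_left a b), h.trans (Int.gcd_dvd_right a b)⟩
  · intro ⟨h1, h2⟩
    exact Int.dvd_coe_gcd h1 h2

theorem dvd_foldl_pyGcd (i : Int) (xs : List Int) : ∀ (g : Int),
    (i ∣ xs.foldl pyGcd g ↔ i ∣ g ∧ ∀ x ∈ xs, i ∣ x) := by
  induction xs with
  | nil => simp
  | cons x rest ih =>
    intro g
    simp only [List.foldl_cons, ih, dvd_pyGcd_iff, List.mem_cons]
    constructor
    · rintro ⟨⟨hg, hx⟩, hrest⟩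
      exact ⟨hg, fun a ha => ha.elim (fun h => h ▸ hx) (hrest a)⟩
    · rintro ⟨hg, hall⟩
      exact ⟨⟨hg, hall x (Or.inl rfl)⟩, fun a ha => hall a (Or.inr ha)⟩

-- A's inner loop only remembers the last element of arr2
theorem innerFold_eq (i : Int) (l : List Int) (h : l ≠ []) : ∀ (isF : Option Bool),
    l.foldl (fun _ j => some (if calculateBy2param j i == true then false else true)) isF
      = some (if calculateBy2param (l.getLastD 0) i == true then false else true) := by
  induction l with
  | nil => exact absurd rfl h
  | cons a rest ih =>
    intro isF
    cases rest with
    | nil => simp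
    | cons b r =>
      rw [List.foldl_cons]
      exact ih (by simp) _

theorem foldl_id {α β : Type} (f : β → α → β) (l : List α) (s : β)
    (h : ∀ x ∈ l, ∀ t : β, f t x = t) : l.foldl f s = s := by
  induction l generalizing s with
  | nil => rfl
  | cons a rest ih =>
    rw [List.foldl_cons, h a (List.mem_cons_self), ih _ (fun x hx t => h x (List.mem_cons_of_mem _ hx) t)]

theorem set_add_of_mem (s : PySem.Set Int) (x : Int) (h : x ∈ s) : PySem.Set.add s x = s := by
  simp [PySem.Set.add, PySem.Set.contains, h]

theorem mem_set_add (s : PySem.Set Int) (x y : Int) (h : y ∈ s) : y ∈ PySem.Set.add s x := by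
  by_cases hx : x ∈ s
  · rwa [set_add_of_mem s x hx]
  · simp [PySem.Set.add, PySem.Set.contains, hx, h]

-- main fold comparison, for arr2 ≠ []
theorem foldAB (arr1full arr2 : List Int) (g1 g2 : Int) (h2 : arr2 ≠ []) :
    ∀ (l : List Int),
    (∀ i ∈ l,
      ((PySem.Int.mod g1 i == 0 && PySem.Int.mod g2 i == 0) = true →
        calculateIntoTheArray i arr1full = true ∧ calculateBy2param (arr2.getLastD 0) i = true) ∧
      (calculateIntoTheArray i arr1full = true → calculateBy2param (arr2.getLastD 0) i = true →
        (PySem.Int.mod g1 i == 0 && PySem.Int.mod g2 i == 0) = false → i = -8)) →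
    ∀ (isF : Option Bool) (s : PySem.Set Int), (-8 : Int) ∈ s →
    (l.foldl (calcAStep arr1full arr2) (isF, s)).2 = l.foldl (calcBStep g1 g2) s := by
  intro l
  induction l with
  | nil => intro _ isF s _; rfl
  | cons i rest ih =>
    intro hl isF s hs
    have hi := hl i (List.mem_cons_self)
    have hrest := fun x hx => hl x (List.mem_cons_of_mem _ hx)
    simp only [List.foldl_cons]
    by_cases hA : calculateIntoTheArray i arr1full = true
    · have hinner := innerFold_eq i arr2 h2 isF
      by_cases hlast : calculateBy2param (arr2.getLastD 0) i = true
      · -- A adds i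
        have hstepA : calcAStep arr1full arr2 (isF, s) i = (some false, PySem.Set.add s i) := by
          simp only [calcAStep, hA, if_true, hinner, hlast]
          simp
        by_cases hB : (PySem.Int.mod g1 i == 0 && PySem.Int.mod g2 i == 0) = true
        · -- both add i
          rw [hstepA, show calcBStep g1 g2 s i = PySem.Set.add s i by simp [calcBStep, hB]]
          exact ih hrest _ _ (mem_set_add s i (-8) hs)
        · -- i = -8 : A's add is a no-op, B skips
          have hBf : (PySem.Int.mod g1 i == 0 && PySem.Int.mod g2 i == 0) = false :=
            Bool.eq_false_iff.mpr hB
          have hi8 : i = -8 := hi.2 hA hlast hBf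
          rw [hstepA, set_add_of_mem s i (hi8 ▸ hs),
              show calcBStep g1 g2 s i = s by simp [calcBStep, hBf]]
          exact ih hrest _ _ hs
      · -- A skips; B must skip too
        have hB : (PySem.Int.mod g1 i == 0 && PySem.Int.mod g2 i == 0) = false := by
          by_contra hc
          exact hlast (hi.1 (by simpa using hc)).2
        have hlastf : calculateBy2param (arr2.getLastD 0) i = false := by simpa using hlast
        have hstepA : calcAStep arr1full arr2 (isF, s) i = (some true, s) := by
          simp only [calcAStep, hA, if_true, hinner, hlastf]
          simp
        rw [hstepA, show calcBStep g1 g2 s i = s by simp [calcBStep, hB]]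
        exact ih hrest _ _ hs
    · -- A skips (calcInto false); B must skip
      have hB : (PySem.Int.mod g1 i == 0 && PySem.Int.mod g2 i == 0) = false := by
        by_contra hc
        exact hA (hi.1 (by simpa using hc)).1
      have hAf : calculateIntoTheArray i arr1full = false := by simpa using hA
      rw [show calcAStep arr1full arr2 (isF, s) i = (isF, s) by simp [calcAStep, hAf],
          show calcBStep g1 g2 s i = s by simp [calcBStep, hB]]
      exact ih hrest _ _ hs

theorem getLastD_mem (l : List Int) (h : l ≠ []) (d : Int) : l.getLastD d ∈ l := by
  induction l with
  | nil => exact absurd rfl h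
  | cons a rest ih =>
    cases rest with
    | nil => simp
    | cons b r =>
      rw [show (a :: b :: r).getLastD d = (b :: r).getLastD d by simp]
      exact List.mem_cons_of_mem a (ih (by simp))

-- B-side membership characterization
theorem memB_iff (g1 g2 : Int) (x : Int) : ∀ (l : List Int) (s : PySem.Set Int),
    (x ∈ l.foldl (calcBStep g1 g2) s ↔ x ∈ s ∨ (x ∈ l ∧ (PySem.Int.mod g1 x == 0 && PySem.Int.mod g2 x == 0) = true)) := by
  intro l
  induction l with
  | nil => simp
  | cons i rest ih =>
    intro s
    simp only [List.foldl_cons, ih, List.mem_cons]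
    unfold calcBStep
    by_cases hc : (PySem.Int.mod g1 i == 0 && PySem.Int.mod g2 i == 0) = true
    · simp only [hc, if_true]
      constructor
      · rintro (hmem | h)
        · by_cases hi : i ∈ s
          · rw [set_add_of_mem s i hi] at hmem
            exact Or.inl hmem
          · have hx : x ∈ s ++ [i] := by simpa [PySem.Set.add, PySem.Set.contains, hi] using hmem
            rcases List.mem_append.mp hx with h' | h'
            · exact Or.inl h'
            · have hxi : x = i := by simpa using h'
              subst hxi
              exact Or.inr ⟨Or.inl rfl, hc⟩
        · exact Or.inr ⟨Or.inr h.1, h.2⟩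
      · rintro (hmem | ⟨(rfl | hx), hcond⟩)
        · exact Or.inl (mem_set_add s i x hmem)
        · by_cases hi : x ∈ s
          · exact Or.inl (mem_set_add s x x hi)
          · exact Or.inl (by simp [PySem.Set.add, PySem.Set.contains, hi])
        · exact Or.inr ⟨hx, hcond⟩
    · simp only [hc]
      constructor
      · rintro (hmem | h)
        · exact Or.inl hmem
        · exact Or.inr ⟨Or.inr h.1, h.2⟩
      · rintro (hmem | ⟨(rfl | hx), hcond⟩)
        · exact Or.inl hmem
        · exact absurd hcond (by simpa using hc)
        · exact Or.inr ⟨hx, hcond⟩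

-- A-side: membership is monotone and a qualifying i gets added
theorem memA_mono (arr1full arr2 : List Int) (x : Int) : ∀ (l : List Int) (st : Option Bool × PySem.Set Int),
    x ∈ st.2 → x ∈ (l.foldl (calcAStep arr1full arr2) st).2 := by
  intro l
  induction l with
  | nil => intro st h; exact h
  | cons i rest ih =>
    intro st h
    rw [List.foldl_cons]
    apply ih
    unfold calcAStep
    split
    · simp only
      split
      · exact mem_set_add _ _ _ h
      · exact h
    · exact h

theorem memA_of_qual (arr1full arr2 : List Int) (h2 : arr2 ≠ []) (i : Int)
    (hA : calculateIntoTheArray i arr1full = true)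
    (hlast : calculateBy2param (arr2.getLastD 0) i = true) :
    ∀ (l : List Int) (st : Option Bool × PySem.Set Int),
    i ∈ l → i ∈ (l.foldl (calcAStep arr1full arr2) st).2 := by
  intro l
  induction l with
  | nil => intro _ h; exact absurd h (List.not_mem_nil)
  | cons a rest ih =>
    intro st hmem
    rw [List.foldl_cons]
    rcases List.mem_cons.mp hmem with rfl | hrest
    · apply memA_mono
      have hstepA : calcAStep arr1full arr2 st i = (some false, PySem.Set.add st.2 i) := by
        simp only [calcAStep, hA, if_true, innerFold_eq i arr2 h2 st.1, hlast]
        simp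
      rw [hstepA]
      by_cases hi : i ∈ st.2
      · simpa [set_add_of_mem st.2 i hi]
      · simp [PySem.Set.add, PySem.Set.contains, hi]
    · exact ih _ hrest

-- ===== VERDICT (by name: the statement is the Claim_ definition above) =====
theorem calculateForArr_spec : Claim_unchanged_calculateForArr := by
  unfold Claim_unchanged_calculateForArr
  intro arr1 arr2 _ hpre hnd
  unfold calculateForArr calculateForArr_alt
  cases harr2 : arr2 with
  | nil =>
    -- both folds are the identity: no i divides all of arr1
    subst harr2
    have hno : ∀ i ∈ arr1, ∃ a ∈ arr1, ¬ i ∣ a := hpre.2 rfl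
    have hA : (arr1.foldl (calcAStep arr1 ([] : List Int)) ((none : Option Bool), PySem.Set.ofList [(-8 : Int)])) = ((none : Option Bool), PySem.Set.ofList [(-8 : Int)]) := by
      apply foldl_id
      intro i hi st
      obtain ⟨a, ha, hna⟩ := hno i hi
      have : calculateIntoTheArray i arr1 = false := by
        rw [← Bool.not_eq_true, calcInto_iff]
        exact fun hc => hna (hc a ha)
      simp [calcAStep, this]
    show _ = List.foldl (calcBStep (List.foldl pyGcd 0 arr1) (List.foldl pyGcd 0 ([] : List Int))) (PySem.Set.ofList [(-8 : Int)]) arr1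
    rw [hA]
    have hB : arr1.foldl (calcBStep (arr1.foldl pyGcd 0) (([] : List Int).foldl pyGcd 0)) (PySem.Set.ofList [(-8 : Int)]) = PySem.Set.ofList [(-8 : Int)] := by
      apply foldl_id
      intro i hi st
      obtain ⟨a, ha, hna⟩ := hno i hi
      have hg1 : ¬ i ∣ arr1.foldl pyGcd 0 := by
        rw [dvd_foldl_pyGcd]
        exact fun hc => hna (hc.2 a ha)
      have : (PySem.Int.mod (arr1.foldl pyGcd 0) i == 0) = false := by
        simp only [beq_eq_false_iff_ne, ne_eq, PySem.Int.mod_eq_zero_iff_dvd]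
        exact hg1
      simp [calcBStep, this]
    rw [hB]
  | cons j rest =>
    subst harr2
    apply foldAB _ _ _ _ (by simp)
    · intro i hi
      constructor
      · intro hB
        have hB' : i ∣ (j :: rest).foldl pyGcd 0 ∧ i ∣ arr1.foldl pyGcd 0 := by
          simp only [Bool.and_eq_true, beq_iff_eq, PySem.Int.mod_eq_zero_iff_dvd] at hB
          exact ⟨hB.2, hB.1⟩
        have hall1 : ∀ a ∈ arr1, i ∣ a := ((dvd_foldl_pyGcd i arr1 0).mp hB'.2).2
        have hall2 : ∀ a ∈ (j :: rest), i ∣ a := ((dvd_foldl_pyGcd i (j :: rest) 0).mp hB'.1).2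
        refine ⟨(calcInto_iff i arr1).mpr hall1, ?_⟩
        have hd : i ∣ (j :: rest).getLastD 0 := hall2 _ (getLastD_mem (j :: rest) (by simp) 0)
        rw [List.getLastD_eq_getLast?] at hd
        simp [calculateBy2param, PySem.Int.mod_eq_zero_iff_dvd, hd]
      · intro hA hlast hB
        by_contra hne
        apply hnd
        refine ⟨by simp, i, hi, hne, (calcInto_iff i arr1).mp hA, ?_, ?_⟩
        · simpa [calculateBy2param, PySem.Int.mod_eq_zero_iff_dvd] using hlast
        · -- from hB = false, i does not divide some element of arr2
          have hg1 : i ∣ arr1.foldl pyGcd 0 :=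
            (dvd_foldl_pyGcd i arr1 0).mpr ⟨dvd_zero i, (calcInto_iff i arr1).mp hA⟩
          have hmod1 : (PySem.Int.mod (arr1.foldl pyGcd 0) i == 0) = true := by
            simpa [PySem.Int.mod_eq_zero_iff_dvd] using hg1
          rw [hmod1] at hB
          simp only [Bool.true_and, beq_eq_false_iff_ne, ne_eq, PySem.Int.mod_eq_zero_iff_dvd] at hB
          rw [dvd_foldl_pyGcd] at hB
          push_neg at hB
          rcases hB (dvd_zero i) with ⟨a, ha, hna⟩
          exact ⟨a, ha, hna⟩
    · simp [PySem.Set.ofList]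

theorem calculateForArr_changed : Claim_changed_calculateForArr := by
  unfold Claim_changed_calculateForArr; decide

theorem calculateForArr_tight : Claim_exact_calculateForArr := by
  unfold Claim_exact_calculateForArr
  intro arr1 arr2 _ hpre hd heq
  obtain ⟨h2, i, hi, hi8, hall1, hlastd, j, hj, hnj⟩ := hd
  rw [List.getLastD_eq_getLast?] at hlastd
  have hiA : i ∈ calculateForArr arr1 arr2 := by
    unfold calculateForArr
    apply memA_of_qual arr1 arr2 h2 i ((calcInto_iff i arr1).mpr hall1)
      (by simp [calculateBy2param, PySem.Int.mod_eq_zero_iff_dvd, hlastd]) arr1 _ hi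
  have hiB : i ∉ calculateForArr_alt arr1 arr2 := by
    unfold calculateForArr_alt
    simp only
    rw [memB_iff]
    push_neg
    constructor
    · simp [PySem.Set.ofList, hi8]
    · intro _ hcond
      simp only [Bool.and_eq_true, beq_iff_eq, PySem.Int.mod_eq_zero_iff_dvd] at hcond
      have := ((dvd_foldl_pyGcd i arr2 0).mp hcond.2).2 j hj
      exact hnj this
  rw [heq] at hiA
  exact hiB hiA
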